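-- pv_equiv track=rewrite | github.com/tseesurenb/steer | data/prep/prep_item_features.py | compute_item_features
-- ===== SOURCE A (Python) =====
-- from collections import defaultdict
--
-- def compute_item_features(data, cutoff):
--     """Compute item features from training data (before cutoff).
--
--     Returns:
--         features: dict item_id -> (first_ts, last_ts, num_users)
--         t_min: minimum timestamp in training data
--         t_max: maximum timestamp in training data (before cutoff)
--     """
--     item_timestamps = defaultdict(list)
--     item_users = defaultdict(set)
--     train_timestamps = []
--
--     for user, item, ts in data:
--         if ts < cutoff:  # Training data only
--             item_timestamps[item].append(ts)
--             item_users[item].add(user)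
--             train_timestamps.append(ts)
--
--     features = {}
--     for item in item_timestamps:
--         first_ts = min(item_timestamps[item])
--         last_ts = max(item_timestamps[item])
--         num_users = len(item_users[item])
--         features[item] = (first_ts, last_ts, num_users)
--
--     t_min = min(train_timestamps)
--     t_max = max(train_timestamps)
--
--     return features, t_min, t_max
-- ===== SOURCE B (Python) =====
-- def compute_item_features(data, cutoff):
--     """Single pass: per-item running (first_ts, last_ts, user-set) and global bounds."""
--     stats = {}
--     bounds = None
--     for user, item, ts in data:
--         if ts < cutoff:
--             cur = stats.get(item)
--             if cur is None:
--                 stats[item] = (ts, ts, {user})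
--             else:
--                 f, l, s = cur
--                 s.add(user)
--                 stats[item] = (min(f, ts), max(l, ts), s)
--             bounds = (ts, ts) if bounds is None else (min(bounds[0], ts), max(bounds[1], ts))
--     if bounds is None:
--         raise ValueError("no training data before cutoff")
--     features = {item: (f, l, len(s)) for item, (f, l, s) in stats.items()}
--     return features, bounds[0], bounds[1]
-- ===== Notes on version B (the rewrite author's own statement) =====
-- stated objective: alternative
-- what changed: B replaces A's grouping of all timestamps into per-item lists followed by a second min/max reduction pass with a single pass that keeps an incremental per-item (first_ts, last_ts, user-set) record and running global t_min/t_max scalars, so no timestamp lists are ever materialized.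
import Mathlib
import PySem

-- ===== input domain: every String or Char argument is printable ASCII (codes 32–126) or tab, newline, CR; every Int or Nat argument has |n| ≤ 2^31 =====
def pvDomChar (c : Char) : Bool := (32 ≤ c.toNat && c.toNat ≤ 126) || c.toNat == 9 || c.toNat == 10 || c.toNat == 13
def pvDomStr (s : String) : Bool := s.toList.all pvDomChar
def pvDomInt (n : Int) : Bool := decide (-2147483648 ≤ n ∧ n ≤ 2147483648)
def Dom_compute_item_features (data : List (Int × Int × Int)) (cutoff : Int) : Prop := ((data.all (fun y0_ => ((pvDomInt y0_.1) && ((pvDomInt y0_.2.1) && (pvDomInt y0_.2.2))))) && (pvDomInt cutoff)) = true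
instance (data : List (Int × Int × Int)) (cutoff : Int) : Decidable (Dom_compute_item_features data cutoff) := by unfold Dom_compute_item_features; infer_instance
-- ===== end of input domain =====

-- B replaces A's grouped timestamp lists + second reduction pass by a single pass with
-- incremental per-item min/max and running global bounds (objective: alternative decomposition).

-- ===== PORT A =====
-- one loop body: append ts to item_timestamps[item], add user to item_users[item], append ts to train_timestamps
def pvAStep (cutoff : Int)
    (st : PySem.Dict Int (List Int) × PySem.Dict Int (PySem.Set Int) × List Int)
    (t : Int × Int × Int) :
    PySem.Dict Int (List Int) × PySem.Dict Int (PySem.Set Int) × List Int :=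
  if t.2.2 < cutoff then
    (st.1.modify t.2.1 [] (· ++ [t.2.2]),
     st.2.1.modify t.2.1 PySem.Set.empty (fun s => PySem.Set.add s t.1),
     st.2.2 ++ [t.2.2])
  else st

def compute_item_features (data : List (Int × Int × Int)) (cutoff : Int) :
    (List (Int × Int × Int × Int)) × Int × Int :=
  let st := data.foldl (pvAStep cutoff) (PySem.Dict.empty, PySem.Dict.empty, [])
  let itemTs := st.1
  let itemUsers := st.2.1
  let trainTs := st.2.2
  let features := itemTs.keys.foldl (fun f item =>
      f.insert item (((PySem.List.min? (itemTs.getD item []) (fun x => x)).getD 0,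
                      (PySem.List.max? (itemTs.getD item []) (fun x => x)).getD 0,
                      (PySem.Set.len (itemUsers.getD item PySem.Set.empty) : Int)))) PySem.Dict.empty
  -- min([]) / max([]) raise ValueError in Python: those inputs are excluded by Pre_; getD 0 is never the value used
  (features.items,
   (PySem.List.min? trainTs (fun x => x)).getD 0,
   (PySem.List.max? trainTs (fun x => x)).getD 0)

-- ===== PORT B =====
-- incremental update of the per-item (first_ts, last_ts, user-set) record
def pvBUpd (cur : Option (Int × Int × PySem.Set Int)) (user ts : Int) : Int × Int × PySem.Set Int :=
  match cur with
  | none => (ts, ts, PySem.Set.add PySem.Set.empty user)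
  | some (f, l, s) => (min f ts, max l ts, PySem.Set.add s user)

def pvBBoundsStep (b : Option (Int × Int)) (t : Int × Int × Int) : Option (Int × Int) :=
  match b with
  | none => some (t.2.2, t.2.2)
  | some lohi => some (min lohi.1 t.2.2, max lohi.2 t.2.2)

def pvBStep (cutoff : Int)
    (st : PySem.Dict Int (Int × Int × PySem.Set Int) × Option (Int × Int))
    (t : Int × Int × Int) :
    PySem.Dict Int (Int × Int × PySem.Set Int) × Option (Int × Int) :=
  if t.2.2 < cutoff then
    (st.1.insert t.2.1 (pvBUpd (st.1.get? t.2.1) t.1 t.2.2), pvBBoundsStep st.2 t)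
  else st

def compute_item_features_alt (data : List (Int × Int × Int)) (cutoff : Int) :
    (List (Int × Int × Int × Int)) × Int × Int :=
  let st := data.foldl (pvBStep cutoff) (PySem.Dict.empty, none)
  match st.2 with
  | none => ([], 0, 0)   -- Python B raises ValueError here; excluded by Pre_
  | some lohi =>
    (st.1.items.map (fun p => (p.1, p.2.1, p.2.2.1, (PySem.Set.len p.2.2.2 : Int))),
     lohi.1, lohi.2)

-- ===== PRECONDITION & SPEC =====
-- Pre_ excludes exactly the inputs with no record before the cutoff, on which Python A raises
-- ValueError (min of an empty sequence); Python B raises ValueError there too.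
def Pre_compute_item_features (data : List (Int × Int × Int)) (cutoff : Int) : Prop :=
  data.filter (fun t => t.2.2 < cutoff) ≠ []
instance (data : List (Int × Int × Int)) (cutoff : Int) : Decidable (Pre_compute_item_features data cutoff) := by unfold Pre_compute_item_features; infer_instance

def pvWitness_compute_item_features : (List (Int × Int × Int)) × Int := ([(1, 2, 3)], 5)

def Spec_compute_item_features (data : List (Int × Int × Int)) (cutoff : Int) (out : (List (Int × Int × Int × Int)) × Int × Int) : Prop := out = compute_item_features_alt data cutoff
instance (data : List (Int × Int × Int)) (cutoff : Int) (out : (List (Int × Int × Int × Int)) × Int × Int) : Decidable (Spec_compute_item_features data cutoff out) := by unfold Spec_compute_item_features; infer_instance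

-- ===== CLAIM (what is proved, stated in full; the proofs are below) =====
def Claim_equal_compute_item_features : Prop := ∀ (data : List (Int × Int × Int)) (cutoff : Int), Dom_compute_item_features data cutoff → Pre_compute_item_features data cutoff → Spec_compute_item_features data cutoff (compute_item_features data cutoff)

-- ===== LEMMAS AND PROOFS =====

-- A's guarded fold over data is the unguarded fold over the filtered list
theorem pvA_fold_filter (data : List (Int × Int × Int)) (cutoff : Int)
    (st : PySem.Dict Int (List Int) × PySem.Dict Int (PySem.Set Int) × List Int) :
    data.foldl (pvAStep cutoff) st
      = (data.filter (fun t => t.2.2 < cutoff)).foldl (fun st t =>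
          (st.1.modify t.2.1 [] (· ++ [t.2.2]),
           st.2.1.modify t.2.1 PySem.Set.empty (fun s => PySem.Set.add s t.1),
           st.2.2 ++ [t.2.2])) st := by
  rw [List.foldl_filter]
  congr 1
  funext st t
  by_cases h : t.2.2 < cutoff <;> simp [pvAStep, h]

theorem pvB_fold_filter (data : List (Int × Int × Int)) (cutoff : Int)
    (st : PySem.Dict Int (Int × Int × PySem.Set Int) × Option (Int × Int)) :
    data.foldl (pvBStep cutoff) st
      = (data.filter (fun t => t.2.2 < cutoff)).foldl (fun st t =>
          (st.1.insert t.2.1 (pvBUpd (st.1.get? t.2.1) t.1 t.2.2), pvBBoundsStep st.2 t)) st := by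
  rw [List.foldl_filter]
  congr 1
  funext st t
  by_cases h : t.2.2 < cutoff <;> simp [pvBStep, h]

-- componentwise splitting of A's triple fold
theorem pvA_fold_split (L : List (Int × Int × Int))
    (d : PySem.Dict Int (List Int)) (u : PySem.Dict Int (PySem.Set Int)) (w : List Int) :
    L.foldl (fun st t =>
          (st.1.modify t.2.1 [] (· ++ [t.2.2]),
           st.2.1.modify t.2.1 PySem.Set.empty (fun s => PySem.Set.add s t.1),
           st.2.2 ++ [t.2.2])) (d, u, w)
      = (L.foldl (fun d t => d.modify t.2.1 [] (· ++ [t.2.2])) d,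
         L.foldl (fun u t => u.modify t.2.1 PySem.Set.empty (fun s => PySem.Set.add s t.1)) u,
         w ++ L.map (fun t => t.2.2)) := by
  induction L generalizing d u w with
  | nil => simp
  | cons x xs ih =>
    simp only [List.foldl_cons, List.map_cons]
    rw [ih]
    simp

-- componentwise splitting of B's pair fold
theorem pvB_fold_split (L : List (Int × Int × Int))
    (s : PySem.Dict Int (Int × Int × PySem.Set Int)) (b : Option (Int × Int)) :
    L.foldl (fun st t =>
          (st.1.insert t.2.1 (pvBUpd (st.1.get? t.2.1) t.1 t.2.2), pvBBoundsStep st.2 t)) (s, b)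
      = (L.foldl (fun s t => s.insert t.2.1 (pvBUpd (s.get? t.2.1) t.1 t.2.2)) s,
         L.foldl pvBBoundsStep b) := by
  induction L generalizing s b with
  | nil => rfl
  | cons x xs ih => simp [ih]

-- the user-set grouping fold, per key
theorem pv_getD_foldl_modify_setadd (l : List (Int × Int × Int))
    (u : PySem.Dict Int (PySem.Set Int)) (c : Int) :
    (l.foldl (fun u t => u.modify t.2.1 PySem.Set.empty (fun s => PySem.Set.add s t.1)) u).getD c PySem.Set.empty
      = ((l.filter (fun t => t.2.1 == c)).map (fun t => t.1)).foldl PySem.Set.add (u.getD c PySem.Set.empty) := by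
  induction l generalizing u with
  | nil => rfl
  | cons x xs ih =>
    rw [List.foldl_cons, ih]
    by_cases h : x.2.1 = c
    · simp [h, PySem.Dict.getD_modify]
    · simp [h, (show c ≠ x.2.1 from fun hc => h hc.symm), PySem.Dict.getD_modify]

-- B's per-key record fold
theorem pv_get?_B_fold (l : List (Int × Int × Int))
    (s : PySem.Dict Int (Int × Int × PySem.Set Int)) (c : Int) :
    (l.foldl (fun s t => s.insert t.2.1 (pvBUpd (s.get? t.2.1) t.1 t.2.2)) s).get? c
      = (l.filter (fun t => t.2.1 == c)).foldl (fun o t => some (pvBUpd o t.1 t.2.2)) (s.get? c) := by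
  induction l generalizing s with
  | nil => rfl
  | cons x xs ih =>
    rw [List.foldl_cons, ih]
    by_cases h : x.2.1 = c
    · simp [h, PySem.Dict.get?_insert]
    · simp [h, (show c ≠ x.2.1 from fun hc => h hc.symm), PySem.Dict.get?_insert]

-- reducing B's per-key record fold from a some-state
theorem pv_red_some (l : List (Int × Int × Int)) (f l0 : Int) (s : PySem.Set Int) :
    l.foldl (fun o t => some (pvBUpd o t.1 t.2.2)) (some (f, l0, s))
      = some ((l.map (fun t => t.2.2)).foldl min f,
              (l.map (fun t => t.2.2)).foldl max l0,
              (l.map (fun t => t.1)).foldl PySem.Set.add s) := by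
  induction l generalizing f l0 s with
  | nil => rfl
  | cons x xs ih =>
    simp only [List.foldl_cons, List.map_cons]
    rw [show pvBUpd (some (f, l0, s)) x.1 x.2.2 = (min f x.2.2, max l0 x.2.2, s.add x.1) from rfl, ih]

-- reducing B's bounds fold from a some-state
theorem pv_bounds_some (l : List (Int × Int × Int)) (lo hi : Int) :
    l.foldl pvBBoundsStep (some (lo, hi))
      = some ((l.map (fun t => t.2.2)).foldl min lo, (l.map (fun t => t.2.2)).foldl max hi) := by
  induction l generalizing lo hi with
  | nil => rfl
  | cons x xs ih =>
    simp only [List.foldl_cons, List.map_cons, pvBBoundsStep]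
    rw [ih]

-- the timestamp grouping fold, per key
theorem pv_getD_foldl_modify_append (l : List (Int × Int × Int))
    (d : PySem.Dict Int (List Int)) (c : Int) :
    (l.foldl (fun d t => d.modify t.2.1 [] (fun x => x ++ [t.2.2])) d).getD c []
      = d.getD c [] ++ (l.filter (fun t => t.2.1 == c)).map (fun t => t.2.2) := by
  induction l generalizing d with
  | nil => simp
  | cons x xs ih =>
    rw [List.foldl_cons, ih]
    by_cases h : x.2.1 = c
    · simp [h, PySem.Dict.getD_modify]
    · simp [h, (show c ≠ x.2.1 from fun hc => h hc.symm), PySem.Dict.getD_modify]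

-- both end dicts carry the distinct items, first occurrences in order
theorem pv_keysA (L : List (Int × Int × Int)) :
    (L.foldl (fun d t => d.modify t.2.1 [] (fun x => x ++ [t.2.2]))
        (PySem.Dict.empty : PySem.Dict Int (List Int))).keys
      = PySem.Set.ofList (L.map (fun t => t.2.1)) := by
  rw [PySem.Dict.keys_foldl_modify_key L (fun t => t.2.1) [] (fun _ t => (fun x => x ++ [t.2.2]))
      PySem.Dict.empty]
  simp [PySem.Dict.keys_empty, PySem.Set.update, PySem.Set.ofList_eq_foldl]

theorem pv_keysB (L : List (Int × Int × Int)) :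
    (L.foldl (fun s t => s.insert t.2.1 (pvBUpd (s.get? t.2.1) t.1 t.2.2))
        (PySem.Dict.empty : PySem.Dict Int (Int × Int × PySem.Set Int))).keys
      = PySem.Set.ofList (L.map (fun t => t.2.1)) := by
  rw [PySem.Dict.keys_foldl_insert_key L (fun t => t.2.1)
      (fun s t => pvBUpd (s.get? t.2.1) t.1 t.2.2) PySem.Dict.empty]
  simp [PySem.Dict.keys_empty, PySem.Set.update, PySem.Set.ofList_eq_foldl]

-- per key present in the data, A's (min list, max list, set) is B's incremental record
theorem pv_perkey (L : List (Int × Int × Int)) (k : Int)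
    (hk : k ∈ L.map (fun t => t.2.1)) :
    (((PySem.List.min? ((L.foldl (fun d t => d.modify t.2.1 [] (fun x => x ++ [t.2.2]))
          (PySem.Dict.empty : PySem.Dict Int (List Int))).getD k []) (fun x => x)).getD 0,
      (PySem.List.max? ((L.foldl (fun d t => d.modify t.2.1 [] (fun x => x ++ [t.2.2]))
          (PySem.Dict.empty : PySem.Dict Int (List Int))).getD k []) (fun x => x)).getD 0,
      (PySem.Set.len ((L.foldl (fun u t => u.modify t.2.1 PySem.Set.empty (fun s => PySem.Set.add s t.1))
          (PySem.Dict.empty : PySem.Dict Int (PySem.Set Int))).getD k PySem.Set.empty) : Int)))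
      = (((L.foldl (fun s t => s.insert t.2.1 (pvBUpd (s.get? t.2.1) t.1 t.2.2))
            (PySem.Dict.empty : PySem.Dict Int (Int × Int × PySem.Set Int))).getD k (0, 0, [])).1,
         ((L.foldl (fun s t => s.insert t.2.1 (pvBUpd (s.get? t.2.1) t.1 t.2.2))
            PySem.Dict.empty).getD k (0, 0, [])).2.1,
         (PySem.Set.len ((L.foldl (fun s t => s.insert t.2.1 (pvBUpd (s.get? t.2.1) t.1 t.2.2))
            PySem.Dict.empty).getD k (0, 0, [])).2.2 : Int)) := by
  obtain ⟨y, ys, hys⟩ : ∃ y ys, L.filter (fun t => t.2.1 == k) = y :: ys := by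
    obtain ⟨t, ht, hk'⟩ := List.mem_map.mp hk
    have htf : t ∈ L.filter (fun t => t.2.1 == k) := List.mem_filter.mpr ⟨ht, by simp [hk']⟩
    exact List.exists_cons_of_ne_nil (List.ne_nil_of_mem htf)
  have hD : (L.foldl (fun d t => d.modify t.2.1 [] (fun x => x ++ [t.2.2]))
      (PySem.Dict.empty : PySem.Dict Int (List Int))).getD k []
      = y.2.2 :: ys.map (fun t => t.2.2) := by
    rw [pv_getD_foldl_modify_append, PySem.Dict.getD_empty, hys]; simp
  have hU : (L.foldl (fun u t => u.modify t.2.1 PySem.Set.empty (fun s => PySem.Set.add s t.1))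
      (PySem.Dict.empty : PySem.Dict Int (PySem.Set Int))).getD k PySem.Set.empty
      = (ys.map (fun t => t.1)).foldl PySem.Set.add (PySem.Set.add PySem.Set.empty y.1) := by
    rw [pv_getD_foldl_modify_setadd, PySem.Dict.getD_empty, hys]; simp
  have hS : (L.foldl (fun s t => s.insert t.2.1 (pvBUpd (s.get? t.2.1) t.1 t.2.2))
      (PySem.Dict.empty : PySem.Dict Int (Int × Int × PySem.Set Int))).get? k
      = some ((ys.map (fun t => t.2.2)).foldl min y.2.2,
              (ys.map (fun t => t.2.2)).foldl max y.2.2,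
              (ys.map (fun t => t.1)).foldl PySem.Set.add (PySem.Set.add PySem.Set.empty y.1)) := by
    rw [pv_get?_B_fold, PySem.Dict.get?_empty, hys, List.foldl_cons]
    rw [show pvBUpd none y.1 y.2.2 = (y.2.2, y.2.2, PySem.Set.add PySem.Set.empty y.1) from rfl,
        pv_red_some]
  rw [hD, hU, PySem.Dict.getD_eq_get?_getD, hS, PySem.List.min?_id_cons, PySem.List.max?_id_cons]
  rfl

-- ===== VERDICT (by name: the statement is the Claim_ definition above) =====
theorem compute_item_features_spec : Claim_equal_compute_item_features := by
  intro data cutoff _ hpre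
  unfold Pre_compute_item_features at hpre
  unfold Spec_compute_item_features compute_item_features compute_item_features_alt
  simp only [pvA_fold_filter, pvB_fold_filter, pvA_fold_split, pvB_fold_split, List.nil_append]
  obtain ⟨x, xs, hxL⟩ := List.exists_cons_of_ne_nil hpre
  set L := data.filter (fun t => t.2.2 < cutoff) with hLdef
  set Dts := L.foldl (fun d t => d.modify t.2.1 [] (fun x => x ++ [t.2.2]))
      (PySem.Dict.empty : PySem.Dict Int (List Int)) with hDts
  set Du := L.foldl (fun u t => u.modify t.2.1 PySem.Set.empty (fun s => PySem.Set.add s t.1))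
      (PySem.Dict.empty : PySem.Dict Int (PySem.Set Int)) with hDu
  set S := L.foldl (fun s t => s.insert t.2.1 (pvBUpd (s.get? t.2.1) t.1 t.2.2))
      (PySem.Dict.empty : PySem.Dict Int (Int × Int × PySem.Set Int)) with hSdef
  have hbounds : L.foldl pvBBoundsStep none
      = some ((xs.map (fun t => t.2.2)).foldl min x.2.2, (xs.map (fun t => t.2.2)).foldl max x.2.2) := by
    rw [hxL, List.foldl_cons]
    rw [show pvBBoundsStep none x = some (x.2.2, x.2.2) from rfl, pv_bounds_some]
  have htmin : (PySem.List.min? (L.map (fun t => t.2.2)) (fun x => x)).getD 0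
      = (xs.map (fun t => t.2.2)).foldl min x.2.2 := by
    rw [hxL, List.map_cons, PySem.List.min?_id_cons]; rfl
  have htmax : (PySem.List.max? (L.map (fun t => t.2.2)) (fun x => x)).getD 0
      = (xs.map (fun t => t.2.2)).foldl max x.2.2 := by
    rw [hxL, List.map_cons, PySem.List.max?_id_cons]; rfl
  have hkA : Dts.keys = PySem.Set.ofList (L.map (fun t => t.2.1)) := pv_keysA L
  have hkB : S.keys = PySem.Set.ofList (L.map (fun t => t.2.1)) := pv_keysB L
  have hndK : (PySem.Set.ofList (L.map (fun t => t.2.1))).Nodup := PySem.Set.nodup_ofList _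
  have hFitems : (Dts.keys.foldl (fun f item =>
        f.insert item (((PySem.List.min? (Dts.getD item []) (fun x => x)).getD 0,
                        (PySem.List.max? (Dts.getD item []) (fun x => x)).getD 0,
                        (PySem.Set.len (Du.getD item PySem.Set.empty) : Int)))) PySem.Dict.empty).items
      = Dts.keys.map (fun k => (k, ((PySem.List.min? (Dts.getD k []) (fun x => x)).getD 0,
                        (PySem.List.max? (Dts.getD k []) (fun x => x)).getD 0,
                        (PySem.Set.len (Du.getD k PySem.Set.empty) : Int)))) := by
    simpa using PySem.Dict.items_foldl_insert_fresh Dts.keys (fun a => a)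
      (fun k => (((PySem.List.min? (Dts.getD k []) (fun x => x)).getD 0,
                  (PySem.List.max? (Dts.getD k []) (fun x => x)).getD 0,
                  (PySem.Set.len (Du.getD k PySem.Set.empty) : Int)))) PySem.Dict.empty
      (by simp) (by simpa [List.map_id] using hkA ▸ hndK)
  have hBitems : S.items.map (fun p => (p.1, p.2.1, p.2.2.1, (PySem.Set.len p.2.2.2 : Int)))
      = S.keys.map (fun k => (k, (S.getD k (0, 0, [])).1, (S.getD k (0, 0, [])).2.1,
          (PySem.Set.len (S.getD k (0, 0, [])).2.2 : Int))) := by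
    rw [PySem.Dict.items_eq_map_keys S (hkB ▸ hndK) (0, 0, []), List.map_map]
    rfl
  have hitems : (Dts.keys.foldl (fun f item =>
        f.insert item (((PySem.List.min? (Dts.getD item []) (fun x => x)).getD 0,
                        (PySem.List.max? (Dts.getD item []) (fun x => x)).getD 0,
                        (PySem.Set.len (Du.getD item PySem.Set.empty) : Int)))) PySem.Dict.empty).items
      = S.items.map (fun p => (p.1, p.2.1, p.2.2.1, (PySem.Set.len p.2.2.2 : Int))) := by
    rw [hFitems, hBitems, hkA, hkB]
    refine List.map_congr_left (fun k hkmem => ?_)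
    have hkL : k ∈ L.map (fun t => t.2.1) := (PySem.Set.mem_ofList _ _).mp hkmem
    exact congrArg (fun v => (k, v)) (by simpa using pv_perkey L k hkL)
  rw [hbounds, htmin, htmax, hitems]
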